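/- GENERATED by mk_final_copies.py from the proof of the farm's unit `decode_residue.9` (farm:decode_residue.9.1: Proof.lean) as the
   re-elaboration sweep compiled it — do not edit. -/
import Asan.CheckWalk
import Vorbis.Spec.Units.decode_residue_9
import Vorbis.Spec.Worked.decode_residue_9_Lemmas
open X86 X86.User Asan Vorbis Vorbis.Spec Vorbis.Spec.DecodeResidue

set_option maxRecDepth 4000
set_option maxHeartbeats 4000000

namespace Vorbis.Spec.decode_residue_9

/-- The sign test of `movsx ebx, r14w ; test ebx, ebx ; js`, and the two sign extensions of a non-negative 16-bit value. -/
theorem fh_bits (b : BitVec 16) :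
    ((BitVec.signExtend 32 (BitVec.setWidth 16 (BitVec.zeroExtend 32 b))).msb = false → b < 32768#16) ∧
    (b < 32768#16 → BitVec.signExtend 64 (BitVec.setWidth 16 (BitVec.zeroExtend 32 b)) = BitVec.zeroExtend 64 b) ∧
    (b < 32768#16 → BitVec.signExtend 32 (BitVec.setWidth 16 (BitVec.zeroExtend 32 b)) = BitVec.zeroExtend 32 b) := by
  bv_decide

/-- `js` not taken: the 16-bit value read from `fast_huffman` is below 32768. -/
theorem fh_nonneg (n : Nat) (hn : n < 65536)
    (h : (BitVec.signExtend 32 (BitVec.setWidth 16 (BitVec.zeroExtend 32 (BitVec.ofNat 16 n)))).msb = false) : n < 32768 := by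
  have h1 := (fh_bits (BitVec.ofNat 16 n)).1 h
  rw [BitVec.lt_def, BitVec.toNat_ofNat, BitVec.toNat_ofNat] at h1
  omega

/-- `movsx r14, r14w` of a non-negative 16-bit value. -/
theorem fh_sext64 (n : Nat) (hn : n < 32768) :
    Word.ofBV (BitVec.signExtend 64 (BitVec.setWidth 16 (BitVec.zeroExtend 32 (BitVec.ofNat 16 n)))) = UInt64.ofNat n := by
  have hlt : BitVec.ofNat 16 n < 32768#16 := by
    rw [BitVec.lt_def, BitVec.toNat_ofNat, BitVec.toNat_ofNat]
    omega
  rw [(fh_bits (BitVec.ofNat 16 n)).2.1 hlt]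
  apply UInt64.toNat_inj.mp
  unfold Word.ofBV
  simp only [UInt64.toNat_ofBitVec, BitVec.toNat_setWidth, BitVec.toNat_ofNat, UInt64.toNat_ofNat']
  omega

/-- `movsx ebx, r14w` of a non-negative 16-bit value. -/
theorem fh_sext32 (n : Nat) (hn : n < 32768) :
    Word.ofBV (BitVec.signExtend 32 (BitVec.setWidth 16 (BitVec.zeroExtend 32 (BitVec.ofNat 16 n)))) = UInt64.ofNat n := by
  have hlt : BitVec.ofNat 16 n < 32768#16 := by
    rw [BitVec.lt_def, BitVec.toNat_ofNat, BitVec.toNat_ofNat]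
    omega
  rw [(fh_bits (BitVec.ofNat 16 n)).2.2 hlt]
  apply UInt64.toNat_inj.mp
  unfold Word.ofBV
  simp only [UInt64.toNat_ofBitVec, BitVec.toNat_setWidth, BitVec.toNat_ofNat, UInt64.toNat_ofNat']
  omega

/-- `sub eax, r14d` on `valid_bits ∈ [−1, 32]` and a length byte: no wrap; a result with the sign bit clear is in `[−1, 32]`. -/
theorem vb_bits (a : BitVec 32) (l : BitVec 8) (h1 : a.sle 32#32) (h2 : (4294967295#32).sle a)
    (h : (a - BitVec.zeroExtend 32 (BitVec.setWidth 8 (BitVec.zeroExtend 32 l))).msb = false) :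
    (a - BitVec.zeroExtend 32 (BitVec.setWidth 8 (BitVec.zeroExtend 32 l))).sle 32#32 ∧
      (4294967295#32).sle (a - BitVec.zeroExtend 32 (BitVec.setWidth 8 (BitVec.zeroExtend 32 l))) := by
  bv_decide

/-- The value stored into `f->valid_bits` by the inline DECODE when it is not negative satisfies V1. -/
theorem vb_range (vb len : Nat) (hvb : vb < 2 ^ 32) (h1 : -1 ≤ sint32 vb) (h2 : sint32 vb ≤ 32)
    (h : (BitVec.ofNat 32 vb -
      BitVec.zeroExtend 32 (BitVec.setWidth 8 (BitVec.zeroExtend 32 (BitVec.ofNat 8 len)))).msb = false) :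
    -1 ≤ (BitVec.ofNat 32 vb -
        BitVec.zeroExtend 32 (BitVec.setWidth 8 (BitVec.zeroExtend 32 (BitVec.ofNat 8 len)))).toInt ∧
      (BitVec.ofNat 32 vb -
        BitVec.zeroExtend 32 (BitVec.setWidth 8 (BitVec.zeroExtend 32 (BitVec.ofNat 8 len)))).toInt ≤ 32 := by
  have ea : (BitVec.ofNat 32 vb).toInt = sint32 vb := toInt_ofNat32 vb hvb
  have e32 : (32#32 : BitVec 32).toInt = 32 := by decide
  have em1 : (4294967295#32 : BitVec 32).toInt = -1 := by decide
  have hb := vb_bits (BitVec.ofNat 32 vb) (BitVec.ofNat 8 len)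
    (BitVec.sle_iff_toInt_le.mpr (by rw [ea, e32]; exact h2)) (BitVec.sle_iff_toInt_le.mpr (by rw [ea, em1]; exact h1)) h
  have r1 := BitVec.sle_iff_toInt_le.mp hb.1
  have r2 := BitVec.sle_iff_toInt_le.mp hb.2
  rw [e32] at r1
  rw [em1] at r2
  exact ⟨r2, r1⟩


/-- `and ebx, 0x3ff` as a 64-bit register value. -/
theorem and1023 (acc : Nat) :
    Word.ofBV (BitVec.setWidth 64 (BitVec.ofNat 32 acc &&& 1023#32)) = UInt64.ofNat (acc % 1024) := by
  apply UInt64.toNat_inj.mp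
  unfold Word.ofBV
  simp only [UInt64.toNat_ofBitVec, BitVec.toNat_setWidth, BitVec.toNat_and, BitVec.toNat_ofNat, UInt64.toNat_ofNat']
  have e : (1023 : Nat) % 2 ^ 32 = 2 ^ 10 - 1 := by decide
  rw [e, Nat.and_two_pow_sub_one_eq_mod]
  omega

/-- The address of `c->fast_huffman[acc & 1023]` as the machine computes it. -/
theorem fh_addr (cbk acc : Nat) :
    UInt64.ofNat cbk + (Word.ofBV (BitVec.setWidth 64 (BitVec.ofNat 32 acc &&& 1023#32)) + 24) * 2 =
      addr (cbk + 48 + 2 * (acc % 1024)) := by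
  have e2 : (2 : Word) = addr 2 := rfl
  have e24 : (24 : Word) = addr 24 := rfl
  rw [and1023]
  show addr cbk + (addr (acc % 1024) + 24) * 2 = _
  rw [e24, addr_add_addr, e2, addr_mul_addr, addr_add_addr]
  congr 1
  omega


/-- **`BookPre`** (the precondition of codebook_decode_scalar_raw) at a callee's entry state inside the loop body, from COMMON
of that state: `rdi = f`, `rsi` = the class book (the interface example of Vorbis/Spec/DecodeResidueTest.lean). -/
theorem bookPre_of {u₀ : State} {g : G} (hent : Entered u₀ g) (v s : State) (c1 : Common u₀ g (v.setMem s.mem))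
    (hsh : ShadowPre g.others' g.frames' s) (hrdi : (s.reg .rdi).toNat = g.f) (hrsi : (s.reg .rsi).toNat = clsBook g) :
    BookPre g.others' g.frames' g.Blk g.len s := by
  have hv : Real.VorbisOK g.len g.Blk s.mem g.f := c1.point.vorbis
  have hcfg := hv.config
  have hres : ResidueAtOK g.Blk s.mem g.f g.r := Common.resAt (v := v.setMem s.mem) hent c1
  have hi := hres.R7
  have hsame : Mem.SameExcept (g.spec.footprint g.e) g.e.mem s.mem := c1.same
  have hrsi' : (s.reg .rsi).toNat = stb_vorbis.codebooks_at s.mem g.f (Residue.classbook s.mem g.r) :=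
    hrsi.trans (show Residue.cbk s.mem g.f g.r = clsBook g from c1.reads.cbk).symm
  refine ⟨⟨hsh, ?_, ?_⟩, hent.pre.env.ok, ?_, ?_, ?_⟩
  · rw [hrdi]
    exact hent.reader'
  · rw [hrdi]
    exact hv.bits
  · rw [hrsi']
    refine ⟨_, hcfg.cb0.F2, ?_⟩
    have hcnt := hcfg.cb0.F1
    have hi' : Residue.classbook s.mem g.r < (stb_vorbis.codebook_count s.mem g.f).toNat := by omega
    constructor
    · show stb_vorbis.codebooks s.mem g.f ≤ stb_vorbis.codebooks_at s.mem g.f (Residue.classbook s.mem g.r)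
      unfold stb_vorbis.codebooks_at
      omega
    · show stb_vorbis.codebooks_at s.mem g.f (Residue.classbook s.mem g.r) + Off.sizeof.Codebook ≤
        stb_vorbis.codebooks s.mem g.f + Off.sizeof.Codebook * (stb_vorbis.codebook_count s.mem g.f).toNat
      unfold stb_vorbis.codebooks_at
      simp only [voff]
      omega
  · rw [hrsi']
    exact hcfg.books _ hi
  · rw [hrdi, hrsi']
    exact hent.bookApart hsame _ hi

/-- **`Bits` and `μ` over the inline stores of DECODE_RAW**: `f->acc = acc >> len` (any value), the push of a check's return
address off `*f`, `f->valid_bits = x` with `−1 ≤ x ≤ 32`. -/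
theorem inline_bits {Blk : Block → Prop} {len : Nat} {m1 : Mem} {f : Nat} (hb : Bits Blk len m1 f) (sp : Word)
    (hsp : sp.toNat + 8 ≤ f ∨ f + 1808 ≤ sp.toNat) (hsp64 : sp.toNat + 8 < 2 ^ 64) (A ret bn : Nat) (B : BitVec 32)
    (hbn : bn = B.toNat) (hB : -1 ≤ B.toInt ∧ B.toInt ≤ 32) :
    Bits Blk len (((m1.writeLE (UInt64.ofNat f + 1764) 4 A).writeLE sp 8 ret).writeLE (UInt64.ofNat f + 1768) 4 bn) f ∧
      mu (((m1.writeLE (UInt64.ofNat f + 1764) 4 A).writeLE sp 8 ret).writeLE (UInt64.ofNat f + 1768) 4 bn) f = mu m1 f := by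
  have e1 : UInt64.ofNat f + 1764 = addr (f + 1764) := addr_add_lit f 1764
  have e2 : UInt64.ofNat f + 1768 = addr (f + 1768) := addr_add_lit f 1768
  rw [e1, e2, hbn]
  have hb2 := hb.store_other 1764 4 A (by omega) (by omega) (by omega) (by omega) (by omega)
  have hmu2 := hb.mu_store_other 1764 4 A (by omega) (by omega) (by omega) (by omega) (by omega) (by omega)
  have hs : Mem.SameExcept [⟨sp.toNat, sp.toNat + 8⟩] (m1.writeLE (addr (f + 1764)) 4 A)
      ((m1.writeLE (addr (f + 1764)) 4 A).writeLE sp 8 ret) :=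
    Mem.SameExcept.writeLE _ _ _ _ _ hsp64 ⟨_, List.mem_singleton.mpr rfl, Nat.le_refl _, Nat.le_refl _⟩
  obtain ⟨hb3, hmu3⟩ := Vorbis.Spec.Reader.reader_of_window hb2 hs (by omega)
  have hb4 := hb3.store_valid_bits B hB
  have hmu4 := hb3.mu_store_other 1768 4 B.toNat (by omega) (by omega) (by omega) (by omega) (by omega) (by omega)
  exact ⟨hb4.1, by rw [hmu4, hmu3, hmu2]⟩

/-- The signed value of a small number in a register. -/
theorem argInt_small (n : Nat) (h : n < 2 ^ 31) : argInt (UInt64.ofNat n) = (n : Int) := by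
  unfold argInt
  rw [UInt64.toNat_ofNat']
  have e : n % 2 ^ 64 % 2 ^ 32 = n := by omega
  rw [e]
  have := sint32_cases n
  omega

/-- **Block 2** (0x10f825 … 0x10f8d0, 0x10f6fd … 0x10f708; C 2265): DECODE_RAW inline. `fast_huffman[acc & 1023]` negative: the call of
codebook_decode_scalar_raw; else `len = codeword_lengths[var]`, `f->acc >>= len`, `f->valid_bits −= len` (reset to 0 and
`var = −1` when negative). `Bits` is re-established by `inline_bits`, the callee's precondition by `bookPre_of`. From `pAcc` to `pRaw`. -/
theorem blk2 {Lay : Layout} (hLay : Lay.hi = 0x1000000) {μ : Microarch} (hμ : UserX.MicroOK μ) {u₀ : State}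
    (hcode : HasCodeNat Lay u₀ Vorbis.L.decode_residue.entry Vorbis.Code.code_decode_residue.nat Vorbis.L.decode_residue.size)
    (hraw : ∀ (others : List Obj) (frames : List (Nat × FrameLayout)) (Blk : Block → Prop) (len : Nat), Calls Lay μ Vorbis.WayInv (Vorbis.conv u₀) Vorbis.L.codebook_decode_scalar_raw.entry (Vorbis.Spec.codebook_decode_scalar_raw.spec others frames Blk len))
    (hl1 : Asan.SmallCheck Lay μ Vorbis.WayInv (Vorbis.CodeOK u₀) [.rax, .rdx] 1 Vorbis.L.__asan_load1_noabort.entry)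
    (hl8 : Asan.SmallCheck Lay μ Vorbis.WayInv (Vorbis.CodeOK u₀) [.rax, .rcx, .rdx] 8 Vorbis.L.__asan_load8_noabort.entry)
    (hl4 : Asan.SmallCheck Lay μ Vorbis.WayInv (Vorbis.CodeOK u₀) [.rax, .rcx, .rdx] 4 Vorbis.L.__asan_load4_noabort.entry)
    (hl2 : Asan.SmallCheck Lay μ Vorbis.WayInv (Vorbis.CodeOK u₀) [.rax, .rcx, .rdx] 2 Vorbis.L.__asan_load2_noabort.entry)
    {g : G} (hent : Entered u₀ g) {cs pcount : Nat} :
    ∀ j v, AtAcc u₀ g cs pcount j v → ReachVia Lay μ WayInv v (fun v' => AtRaw u₀ g cs pcount j v') := by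
  intro j v hat
  obtain ⟨hrip, body⟩ := hat
  have core := body.core
  have c := core.common
  have he := hent.entry
  v_entry he
  have hr := hraw g.others' g.frames' g.Blk g.len
  have hroom := hent.room
  have hwf := where_f hent
  have hwc := where_cb hent
  have eRA : (g.e.reg .rsp).toNat = g.RA := rfl
  have w_rip := hrip
  have h_rsp := c.rsp
  have h_rbp := c.rbp
  have h_r12 : v.reg .r12 = UInt64.ofNat g.f := by
    rw [core.r12]
    exact eq_addr _ _ rfl
  have h_r13 := body.r13
  have w_eq : Mem.EqOn Vorbis.L.textLo Vorbis.L.textHi u₀.mem v.mem := c.code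
  have hdf : v.flags .df = false := (show abiInv _ from c.inv).1
  have hmx : v.mxcsr &&& 0x1F80 = 0x1F80 := (show abiInv _ from c.inv).2
  have hsse := Vorbis.sseOK_of_abiInv c.inv
  have hbits : Bits g.Blk g.len v.mem g.f := c.point.vorbis.bits
  have hL : BlkLive g.Blk g.Live' := c.point.env.live
  have hcb := cb_ok hent c
  obtain ⟨acc, l_acc⟩ : ∃ acc, v.mem.readLE (UInt64.ofNat g.f + 1764) 4 = acc := ⟨_, rfl⟩
  obtain ⟨vb, l_vb⟩ : ∃ vb, v.mem.readLE (UInt64.ofNat g.f + 1768) 4 = vb := ⟨_, rfl⟩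
  obtain ⟨clp, l_clp⟩ : ∃ clp, v.mem.readLE (UInt64.ofNat (clsBook g) + 8) 8 = clp := ⟨_, rfl⟩
  have hA : UInt64.ofNat (clsBook g) + (Word.ofBV (BitVec.setWidth 64 (BitVec.ofNat 32 acc &&& 1023#32)) + 24) * 2 =
      UInt64.ofNat (clsBook g + 48 + 2 * (acc % 1024)) := fh_addr (clsBook g) acc
  have hk : acc % 1024 < 1024 := Nat.mod_lt _ (by decide)
  obtain ⟨fhraw, l_fh⟩ : ∃ fhraw, v.mem.readLE (UInt64.ofNat (clsBook g + 48 + 2 * (acc % 1024))) 2 = fhraw := ⟨_, rfl⟩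
  have hfhlt : fhraw < 65536 := by
    rw [← l_fh]
    exact Mem.readLE_lt' _ _ 2
  have hvblt : vb < 2 ^ 32 := by
    rw [← l_vb]
    exact Mem.readLE_lt' _ _ 4
  have hfx : 0x119d40 ≤ g.f := (hent.reader.obj.where_ hent.pre.shadow.inv hent.pre.shadow.offText (by decide)).1
  have hfheq : Codebook.fast_huffman v.mem (clsBook g) (acc % 1024) = sint16 fhraw := by
    have e : Codebook.fast_huffman v.mem (clsBook g) (acc % 1024) =
        sint16 (v.mem.readLE (UInt64.ofNat (clsBook g + 48 + 2 * (acc % 1024))) 2) := rfl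
    rw [e, l_fh]
  have hclp : clp = Codebook.codeword_lengths v.mem (clsBook g) := by
    rw [← l_clp]
    simp only [vacc, voff]
    unfold Mem.u64
    rw [← addr_add_lit]
    rfl
  have hvbeq : stb_vorbis.valid_bits v.mem g.f = sint32 vb := by
    rw [← l_vb]
    simp only [vacc, voff]
    unfold Mem.i32 Mem.u32
    rw [← addr_add_lit]
    rfl
  have hV1 := hbits.V1
  rw [hvbeq] at hV1
  have sf := cb_fields hent c
  -- what the fast path knows once `fast_huffman[acc & 1023]` is not negative
  have hKl : fhraw < 32768 → ∃ len : Nat,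
      (∀ y1 y2 y3, (((v.mem.writeLE (g.e.reg .rsp - 256) 8 y1).writeLE (g.e.reg .rsp - 224) 4 y2).writeLE
        (g.e.reg .rsp - 256) 8 y3).readLE (UInt64.ofNat (clp + fhraw)) 1 = len) ∧
      Site g.Live' (clp + fhraw) 1 ∧ (0x100000 ≤ clp + fhraw ∧ clp + fhraw + 1 ≤ 0xC00000) ∧ len < 256 ∧
      DecodeRawResult g.e.mem (clsBook g) (fhraw : Int) := by
    intro h15
    have hs16 : sint16 fhraw = (fhraw : Int) := by
      have := sint16_cases fhraw
      omega
    rw [hs16] at hfheq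
    have hv : 0 ≤ Codebook.fast_huffman v.mem (clsBook g) (acc % 1024) := by
      rw [hfheq]
      exact Int.natCast_nonneg _
    have hsite := hcb.site_lengths_of_fast hL (acc % 1024) hk hv (a := clp + fhraw) (by
      rw [hfheq, Int.toNat_natCast, hclp]
      simp only [Codebook.codeword_lengths_at])
    have hin := hsite.inside c.point.env.covers
    have hwb := where_blk hent hcb.lengths_block
    have hN : (fhraw : Int) < Codebook.N v.mem (clsBook g) := by
      rcases hcb.K5 (acc % 1024) hk with h | h
      · omega
      · omega
    simp only [] at hwb
    rw [← hclp] at hwb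
    have hoff : clp + fhraw + 1 ≤ 0x700000 ∨ 0x800000 ≤ clp + fhraw := by omega
    obtain ⟨len, hlen⟩ : ∃ len, v.mem.readLE (UInt64.ofNat (clp + fhraw)) 1 = len := ⟨_, rfl⟩
    refine ⟨len, ?_, hsite, hin, ?_, ?_⟩
    · intro y1 y2 y3
      u_read
    · rw [← hlen]
      exact Mem.readLE_lt' _ _ 1
    · have hr := hcb.decodeRaw_fast (acc % 1024) hk
      rw [hfheq] at hr
      unfold DecodeRawResult at hr ⊢
      rw [← sf.N]
      exact hr
  u_walk hcode [hμ.vendor, hA] until [pRaw] span [Vorbis.L.textLo, Vorbis.L.textHi] side (v_side)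
  case check_10f82d =>
    -- f->acc (OB1)
    have hun : ShadowUntouched v.mem s_10f82d.mem := by v_untouched
    have hs := hbits.site_field hL 1764 4 (by omega) (by omega) rfl
    exact Vorbis.Spec.check_site c.shadow hun hs (by u_omega)
  case check_10f851 =>
    -- c->fast_huffman[acc & 1023] (inside *c)
    have hun : ShadowUntouched v.mem s_10f851.mem := by v_untouched
    exact Vorbis.Spec.check_site c.shadow hun (site_cb hent c (48 + 2 * (acc % 1024)) 2 (by omega) (by omega)) (by u_omega)
  case call_inv => v_inv
  case check_10f86c =>
    -- c->codeword_lengths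
    have hun : ShadowUntouched v.mem s_10f86c.mem := by v_untouched
    exact Vorbis.Spec.check_site c.shadow hun (site_cb hent c 8 8 (by omega) (by omega)) (by u_omega)
  case check_10f87c =>
    -- c->codeword_lengths[var], 0 ≤ var < N(c) (K5 + K3)
    have hun : ShadowUntouched v.mem s_10f87c.mem := by v_untouched
    have h15 := fh_nonneg fhraw hfhlt hbr_10f862
    obtain ⟨len, hrd, hsite, hwl, hlen, hres⟩ := hKl h15
    rw [fh_sext64 fhraw h15]
    exact Vorbis.Spec.check_site c.shadow hun hsite (by u_omega)
  case check_10f8a1 =>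
    -- f->valid_bits (OB1)
    have hun : ShadowUntouched v.mem s_10f8a1.mem := by v_untouched
    have hs := hbits.site_field hL 1768 4 (by omega) (by omega) rfl
    exact Vorbis.Spec.check_site c.shadow hun hs (by u_omega)
  case pre_10f703 =>
    -- codebook_decode_scalar_raw's precondition at its entry state
    have hun : ShadowUntouched v.mem s_10f703.mem := by v_untouched
    have hsc : Mem.SameExcept (scratch g) v.mem s_10f703.mem := by
      rw [w_mem, scratch_def]
      u_same
    have c1 : Common u₀ g (v.setMem s_10f703.mem) := common_scratch hent c c.rbp c.rsp w_eq c.inv hsc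
    have e8 : (s_10f703.reg .rsp).toNat + 8 = g.RA - 248 := by
      rw [w_rsp]
      u_omega
    refine bookPre_of hent v s_10f703 c1 ⟨?_, hent.offText'⟩ ?_ ?_
    · rw [e8]
      exact c.shadow.untouched hun
    · rw [w_rdi]
      u_omega
    · rw [w_rsi]
      u_omega
  · -- after codebook_decode_scalar_raw (0x10f708 `mov ebx, eax`)
    v_after_call w_rsp_10f703 w_mem_10f703
    obtain ⟨hf1, hf2, hf3⟩ := hwf
    have erdi : (UInt64.ofNat g.f).toNat = g.f := by u_omega
    simp only [w_rdi_10f703, erdi] at w_same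
    have hp1 : s_10f703.mem.readLE (g.e.reg .rsp - 192) 8 = j := by
      rw [w_mem_10f703]
      u_frame body.sl_j
    rw [w_mem_10f703] at hp1
    have hs1 : s_10f703r.mem.readLE (g.e.reg .rsp - 192) 8 = j := by u_frame hp1
    have hsame : Mem.SameExcept (stepSpans g) v.mem s_10f703r.mem := by
      rw [stepSpans_def]
      u_same
    have hpost : ScalarRawPost g.Blk g.len s_10f703 s_10f703r := w_post
    have hsc : Mem.SameExcept (scratch g) v.mem s_10f703.mem := by
      rw [w_mem_10f703, scratch_def]
      u_same
    have hmu0 := (step_of_scratch hent c hsc).2.2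
    have c1 : Common u₀ g (v.setMem s_10f703.mem) :=
      common_scratch hent c c.rbp c.rsp
        ((show Mem.EqOn L.textLo L.textHi u₀.mem v.mem from c.code).trans
          (hsc.eqOn _ _ (scratch_off hent _ _ (by decide)))) c.inv hsc
    have sf1 : Codebook.SameFields g.e.mem s_10f703.mem (clsBook g) := cb_fields (v := v.setMem s_10f703.mem) hent c1
    have hreader := hpost.reader
    have hresult := hpost.result
    have hhi := hpost.hi
    rw [w_rdi_10f703, erdi] at hreader
    have ersi : (s_10f703.reg .rsi).toNat = clsBook g := by
      rw [w_rsi_10f703]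
      u_omega
    rw [ersi] at hresult
    have hbody : LoopBody u₀ g cs pcount j s_10f703r := by
      refine body_step hent body ?_ w_rsp (Vorbis.conv_code_eqOn w_code) w_inv (w_kept.get .r12 rfl) (w_kept.get .r15 rfl)
        (w_kept.get .r13 rfl) hs1 hsame hreader.bits ?_
      · rw [w_kept.get .rbp rfl]
        exact h_rbp
      · rw [← hmu0]
        exact hreader.mu_le
    have hres : DecodeRawResult g.e.mem (clsBook g) (argInt (s_10f703r.reg .rax)) := by
      unfold DecodeRawResult at hresult ⊢
      rw [← sf1.N]
      exact hresult
    have w_eq := Vorbis.conv_code_eqOn w_code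
    have hdf' : s_10f703r.flags .df = false := w_inv.1
    have hmx' : s_10f703r.mxcsr &&& 0x1F80 = 0x1F80 := w_inv.2
    have k12 : s_10f703r.reg .r12 = v.reg .r12 := w_kept.get .r12 rfl
    have k13 : s_10f703r.reg .r13 = v.reg .r13 := w_kept.get .r13 rfl
    have k15 : s_10f703r.reg .r15 = v.reg .r15 := w_kept.get .r15 rfl
    obtain ⟨z, h_rax⟩ : ∃ z, s_10f703r.reg .rax = z := ⟨_, rfl⟩
    rw [h_rax] at hres hhi
    clear w_same w_post hpost hp1 hs1 hsame hsc hmu0 hKl hreader hresult c1 sf1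
    u_walk hcode [hμ.vendor] until [pRaw] span [Vorbis.L.textLo, Vorbis.L.textHi] side (v_side)
    refine ReachVia.done ⟨by rw [w_rip], ?_, ?_⟩
    · have hs : Mem.SameExcept (scratch g) s_10f703r.mem s_10f708.mem := by
        rw [w_mem]
        exact Mem.SameExcept.refl _ _
      refine body_scratch hent hbody ?_ w_rsp w_eq (by v_inv) ((w_kept.get .r12 rfl).trans k12.symm)
        ((w_kept.get .r15 rfl).trans k15.symm) ((w_kept.get .r13 rfl).trans k13.symm) ?_ hs
      · rw [w_kept.get .rbp rfl]
        exact h_rbp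
      · rw [w_mem]
        exact hbody.sl_j
    · rw [w_rbx]
      have e : argInt (Word.ofBV (Word.part .w32 z)) = argInt z := by
        unfold argInt
        rw [toNat_ofBV32, toNat_part32, Nat.mod_mod]
      rw [e]
      exact hres
  · -- the fast path, `valid_bits − len ≥ 0` (0x10f8b9 `jns` taken)
    obtain ⟨hf1, hf2, hf3⟩ := hwf
    have h15 := fh_nonneg fhraw hfhlt hbr_10f862
    obtain ⟨len, hrd, hsite, hwl, hlen, hres⟩ := hKl h15
    have hB : Word.ofBV (BitVec.signExtend 64 (BitVec.setWidth 16 (BitVec.zeroExtend 32 (BitVec.ofNat 16 fhraw)))) +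
        UInt64.ofNat clp = UInt64.ofNat (clp + fhraw) := by
      rw [fh_sext64 fhraw h15, ← UInt64.ofNat_add, Nat.add_comm]
    simp only [hB, hrd] at w_mem hbr_10f8b9
    have hx := vb_range vb len hvblt hV1.1 hV1.2 hbr_10f8b9
    have hsc : Mem.SameExcept (scratch g) v.mem
        (((v.mem.writeLE (g.e.reg .rsp - 256) 8 (UInt64.toNat (pAcc + 13))).writeLE (g.e.reg .rsp - 224) 4
          (BitVec.ofNat 32 acc).toNat).writeLE (g.e.reg .rsp - 256) 8 1112193) := by
      rw [scratch_def]
      u_same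
    obtain ⟨_, hb1, hmu1⟩ := step_of_scratch hent c hsc
    have esp : (g.e.reg .rsp - 256).toNat = g.RA - 256 := by u_omega
    have hib := inline_bits hb1 (g.e.reg .rsp - 256) (by rw [esp]; omega) (by rw [esp]; omega)
    obtain ⟨hb4, hmu4⟩ := hib _ 1112230 _ _ rfl hx
    refine ReachVia.done ⟨by rw [w_rip], ?_, ?_⟩
    · have hs : Mem.SameExcept (stepSpans g) v.mem s_10f8b9.mem := by
        rw [w_mem, stepSpans_def]
        u_same
      refine body_step hent body ?_ w_rsp w_eq (by v_inv) (w_kept.get .r12 rfl) (w_kept.get .r15 rfl)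
        (w_kept.get .r13 rfl) ?_ hs ?_ ?_
      · rw [w_kept.get .rbp rfl]
        exact h_rbp
      · rw [w_mem]
        u_frame body.sl_j
      · rw [w_mem]
        exact hb4
      · rw [w_mem, hmu4, hmu1]
        exact Nat.le_refl _
    · rw [w_rbx, fh_sext32 fhraw h15, argInt_small fhraw (by omega)]
      exact hres
  · -- the fast path, `valid_bits − len < 0`: `valid_bits := 0`, `var := −1`
    obtain ⟨hf1, hf2, hf3⟩ := hwf
    have h15 := fh_nonneg fhraw hfhlt hbr_10f862
    obtain ⟨len, hrd, hsite, hwl, hlen, hres⟩ := hKl h15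
    have hB : Word.ofBV (BitVec.signExtend 64 (BitVec.setWidth 16 (BitVec.zeroExtend 32 (BitVec.ofNat 16 fhraw)))) +
        UInt64.ofNat clp = UInt64.ofNat (clp + fhraw) := by
      rw [fh_sext64 fhraw h15, ← UInt64.ofNat_add, Nat.add_comm]
    simp only [hB, hrd] at w_mem
    have hsc : Mem.SameExcept (scratch g) v.mem
        (((v.mem.writeLE (g.e.reg .rsp - 256) 8 (UInt64.toNat (pAcc + 13))).writeLE (g.e.reg .rsp - 224) 4
          (BitVec.ofNat 32 acc).toNat).writeLE (g.e.reg .rsp - 256) 8 1112193) := by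
      rw [scratch_def]
      u_same
    obtain ⟨_, hb1, hmu1⟩ := step_of_scratch hent c hsc
    have esp : (g.e.reg .rsp - 256).toNat = g.RA - 256 := by u_omega
    have hib := inline_bits hb1 (g.e.reg .rsp - 256) (by rw [esp]; omega) (by rw [esp]; omega)
    obtain ⟨hb4, hmu4⟩ := hib _ 1112230 0 0#32 rfl (by decide)
    refine ReachVia.done ⟨by rw [w_rip], ?_, ?_⟩
    · have hs : Mem.SameExcept (stepSpans g) v.mem s_10f8d0.mem := by
        rw [w_mem, stepSpans_def]
        u_same
      refine body_step hent body ?_ w_rsp w_eq (by v_inv) (w_kept.get .r12 rfl) (w_kept.get .r15 rfl)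
        (w_kept.get .r13 rfl) ?_ hs ?_ ?_
      · rw [w_kept.get .rbp rfl]
        exact h_rbp
      · rw [w_mem]
        u_frame body.sl_j
      · rw [w_mem]
        exact hb4
      · rw [w_mem, hmu4, hmu1]
        exact Nat.le_refl _
    · rw [w_rbx]
      exact Or.inl (by decide)

end Vorbis.Spec.decode_residue_9

/-- Segment 9 of `decode_residue` (the j-loop 2261 of path B, pass 0: DECODE(temp,f,c) expansion #3 and
`part_classdata[j][class_set] = r->classdata[temp]`): the five blocks `blk0` … `blk4` (Lemmas.lean, `blk2` above) composed by
`composeBlocks` (a loop with measure `ch − j`). -/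
theorem Vorbis.Spec.Worked.decode_residue_9_ok : Vorbis.Spec.decode_residue_9.Statement := by
  unfold Vorbis.Spec.decode_residue_9.Statement
  intro Lay hLay μ hμ u₀ hcode hprep hraw hl1 hl8 hl4 hs8 hl2 g hent cs pcount v hat
  exact Vorbis.Spec.decode_residue_9.composeBlocks
    (Vorbis.Spec.decode_residue_9.blk0 hLay hμ hcode hl1 hl8 hent)
    (Vorbis.Spec.decode_residue_9.blk1 hLay hμ hcode hprep hl4 hent)
    (Vorbis.Spec.decode_residue_9.blk2 hLay hμ hcode hraw hl1 hl8 hl4 hl2 hent)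
    (Vorbis.Spec.decode_residue_9.blk3 hLay hμ hcode hl1 hl8 hl4 hent)
    (Vorbis.Spec.decode_residue_9.blk4 hLay hμ hcode hl8 hs8 hent) v hat
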